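-- pv_equiv track=rewrite | github.com/SoerenToennesen/algorithms-practice | CodilityTests/Lesson4_CountingElements/1Easy_FrogRiverOne.py | solution
-- ===== SOURCE A (Python) =====
-- def solution(X, A):
--     index_first_X = -1
--     if X in A:
--         index_first_X = A.index(X)
--     else:
--         return -1
--     sublist_before = A[:index_first_X + 1]
--     sublist_before.sort()
--     sublist_after = A[index_first_X + 1:]
--     missing_leaves = [i for i in range(sublist_before[0], sublist_before[-1]+1) if i not in sublist_before]
--     if missing_leaves == []:
--         return index_first_X
--     for leaf in sublist_after:
--         if leaf in missing_leaves:
--             missing_leaves.remove(leaf)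
--         if missing_leaves == []:
--             return A.index(leaf)
--     return -1
-- ===== SOURCE B (Python) =====
-- def solution(X, A):
--     if X not in A:
--         return -1
--     idx = A.index(X)
--     prefix = set(A[:idx + 1])
--     lo, hi = min(prefix), max(prefix)
--     missing = [v for v in range(lo, hi + 1) if v not in prefix]
--     if not missing:
--         return idx
--     first = {}
--     for j in range(idx + 1, len(A)):
--         v = A[j]
--         if v not in first:
--             first[v] = j
--     best = -1
--     for v in missing:
--         if v not in first:
--             return -1
--         best = max(best, first[v])
--     return best
-- ===== Notes on version B (the rewrite author's own statement) =====
-- stated objective: alternative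
-- what changed: B replaces A's online simulation (a missing-leaf list shrunk while scanning the suffix, returning the moment it empties) by an offline two-stage computation: one pass builds a first-occurrence-index dict of the suffix, and the answer is simply the maximum first-occurrence index over the missing values of the prefix range (or -1 if some missing value never occurs).
import Mathlib
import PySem

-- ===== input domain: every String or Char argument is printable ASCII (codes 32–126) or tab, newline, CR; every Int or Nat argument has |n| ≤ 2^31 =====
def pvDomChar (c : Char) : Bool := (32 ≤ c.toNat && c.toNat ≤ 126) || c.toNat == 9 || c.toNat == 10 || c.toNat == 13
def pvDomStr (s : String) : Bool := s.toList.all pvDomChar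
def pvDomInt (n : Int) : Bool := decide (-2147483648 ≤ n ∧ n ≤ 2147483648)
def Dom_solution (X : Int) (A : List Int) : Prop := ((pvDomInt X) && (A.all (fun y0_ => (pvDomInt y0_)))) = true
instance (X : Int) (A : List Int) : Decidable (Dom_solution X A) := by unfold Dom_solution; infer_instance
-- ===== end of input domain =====

-- B replaces A's online simulation of the missing-leaf list by an offline two-stage
-- computation (first-occurrence dict of the suffix, then a max over the missing values);
-- objective: alternative.

-- ===== PORT A =====
-- A's streaming loop over sublist_after: remove leaf from the missing list,
-- return A.index(leaf) when the list empties.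
def solALoop (A : List Int) (after : List Int) (missing : List Int) : Int :=
  match after with
  | [] => -1
  | leaf :: rest =>
    let m := if leaf ∈ missing then (PySem.List.remove? missing leaf).getD missing else missing
    if m = [] then
      match PySem.List.index? A leaf with
      | some k => (k : Int)
      | none => -1
    else solALoop A rest m

def solution (X : Int) (A : List Int) : Int :=
  if X ∈ A then
    let idx : Nat := (PySem.List.index? A X).getD 0
    let sublist_before := PySem.List.sorted (PySem.List.slice A none (some ((idx : Int) + 1))) (fun x => x) false
    let sublist_after := PySem.List.slice A (some ((idx : Int) + 1)) none
    let lo := PySem.List.pyGetD sublist_before 0 0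
    let hi := PySem.List.pyGetD sublist_before (-1) 0
    let missing := (PySem.List.pyRange lo (hi + 1) 1).filter (fun i => decide (i ∉ sublist_before))
    if missing = [] then (idx : Int)
    else solALoop A sublist_after missing
  else -1

-- ===== PORT B =====
-- B's first loop ('for j in range(idx+1, len(A)): v = A[j]; if v not in first: first[v] = j'),
-- ported as a recursion over the suffix list A.drop (idx+1) carrying the index counter j (exact:
-- A[j] for j = idx+1 … len(A)-1 enumerates exactly that suffix in order).
def solBDict (j : Int) (rest : List Int) (d : PySem.Dict Int Int) : PySem.Dict Int Int :=
  match rest with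
  | [] => d
  | v :: t => solBDict (j + 1) t (if (PySem.Dict.get? d v).isSome then d else PySem.Dict.insert d v j)

-- B's second loop: 'for v in missing: if v not in first: return -1; best = max(best, first[v])'.
def solBBest (first : PySem.Dict Int Int) (best : Int) (ms : List Int) : Int :=
  match ms with
  | [] => best
  | v :: t =>
    match PySem.Dict.get? first v with
    | none => -1
    | some j => solBBest first (max best j) t

def solution_alt (X : Int) (A : List Int) : Int :=
  if X ∈ A then
    let idx : Nat := (PySem.List.index? A X).getD 0
    -- set(A[:idx+1]); the slice bound idx+1 is nonnegative, so it is List.take (idx+1)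
    let prefixVals := PySem.Set.ofList (A.take (idx + 1))
    let lo := (PySem.List.min? prefixVals (fun x => x)).getD 0
    let hi := (PySem.List.max? prefixVals (fun x => x)).getD 0
    let missing := (PySem.List.pyRange lo (hi + 1) 1).filter (fun v => !(PySem.Set.contains prefixVals v))
    if missing = [] then (idx : Int)
    else
      let first := solBDict ((idx : Int) + 1) (A.drop (idx + 1)) PySem.Dict.empty
      solBBest first (-1) missing
  else -1

-- ===== PRECONDITION & SPEC =====
def Spec_solution (X : Int) (A : List Int) (out : Int) : Prop := out = solution_alt X A
instance (X : Int) (A : List Int) (out : Int) : Decidable (Spec_solution X A out) := by unfold Spec_solution; infer_instance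

-- ===== CLAIM (what is proved, stated in full; the proofs are below) =====
def Claim_equal_solution : Prop := ∀ (X : Int) (A : List Int), Dom_solution X A → Spec_solution X A (solution X A)

-- ===== LEMMAS AND PROOFS =====

-- Common characterisation of both loops: -1 if some missing value never occurs in the
-- suffix, else the max over the missing values of (n + first occurrence index in the suffix).
def pvChars (rest : List Int) (n : Int) (b : Int) (M : List Int) : Int :=
  if M.all (fun v => (PySem.List.index? rest v).isSome) then
    M.foldl (fun a v => max a (n + (((PySem.List.index? rest v).getD 0 : Nat) : Int))) b
  else -1

theorem foldl_max_congr (f g : Int → Int) (b : Int) (M : List Int)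
    (h : ∀ w ∈ M, f w = g w) :
    M.foldl (fun a w => max a (f w)) b = M.foldl (fun a w => max a (g w)) b := by
  induction M generalizing b with
  | nil => rfl
  | cons u t ih =>
    simp only [List.foldl_cons]
    rw [h u (by simp), ih _ (fun w hw => h w (by simp [hw]))]

theorem foldl_max_erase (f : Int → Int) (b : Int) (M : List Int) (v : Int) (hv : v ∈ M) :
    M.foldl (fun a w => max a (f w)) b
      = (M.erase v).foldl (fun a w => max a (f w)) (max b (f v)) := by
  induction M generalizing b with
  | nil => simp at hv
  | cons u t ih =>
    by_cases huv : u = v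
    · subst huv; simp [List.erase_cons_head]
    · have hvt : v ∈ t := by
        rcases List.mem_cons.1 hv with h | h
        · exact absurd h.symm huv
        · exact h
      rw [List.erase_cons_tail (by simpa using (fun h => huv (by simpa using h)))]
      simp only [List.foldl_cons]
      rw [ih _ hvt]
      congr 1
      omega

theorem foldl_max_init (f : Int → Int) (b c : Int) (w : Int) (T : List Int)
    (hb : b ≤ f w) (hc : c ≤ f w) :
    (w :: T).foldl (fun a x => max a (f x)) b = (w :: T).foldl (fun a x => max a (f x)) c := by
  simp only [List.foldl_cons]
  rw [max_eq_right hb, max_eq_right hc]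

theorem solBDict_get? (rest : List Int) (n : Int) (d : PySem.Dict Int Int) (v : Int) :
    PySem.Dict.get? (solBDict n rest d) v =
      if (PySem.Dict.get? d v).isSome then PySem.Dict.get? d v
      else (PySem.List.index? rest v).map (fun i => n + (i : Int)) := by
  induction rest generalizing n d with
  | nil =>
    cases h : PySem.Dict.get? d v with
    | none => simp [solBDict, h, PySem.List.index?_eq_idxOf?]
    | some w => simp [solBDict, h]
  | cons u t ih =>
    by_cases huv : v = u
    · subst huv
      rw [PySem.List.index?_cons_self]
      cases h : PySem.Dict.get? d v with
      | none =>
        simp only [solBDict, h, Option.isSome_none, Bool.false_eq_true, if_false, ite_false]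
        rw [ih]
        simp [PySem.Dict.get?_insert_self]
      | some w =>
        simp only [solBDict, h, Option.isSome_some, if_true, ite_true]
        rw [ih]
        simp [h]
    · rw [PySem.List.index?_cons_of_ne t (show u ≠ v from fun h => huv h.symm)]
      simp only [solBDict]
      by_cases h : (PySem.Dict.get? d u).isSome
      · rw [if_pos h, ih]
        cases hv : PySem.Dict.get? d v with
        | some w => simp [hv]
        | none =>
          simp only [hv, Option.isSome_none, Bool.false_eq_true, if_false]
          cases hidx : PySem.List.index? t v with
          | none => simp
          | some i => simp; push_cast; ring
      · rw [if_neg h, ih, PySem.Dict.get?_insert_of_ne d n huv]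
        cases hv : PySem.Dict.get? d v with
        | some w => simp [hv]
        | none =>
          simp only [hv, Option.isSome_none, Bool.false_eq_true, if_false]
          cases hidx : PySem.List.index? t v with
          | none => simp
          | some i => simp; push_cast; ring

theorem solBBest_eq_chars (first : PySem.Dict Int Int) (rest : List Int) (n : Int)
    (hfirst : ∀ v, PySem.Dict.get? first v = (PySem.List.index? rest v).map (fun i => n + (i : Int)))
    (b : Int) (M : List Int) :
    solBBest first b M = pvChars rest n b M := by
  induction M generalizing b with
  | nil => simp [solBBest, pvChars]
  | cons v t ih =>
    cases hidx : PySem.List.index? rest v with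
    | none =>
      have hnm : v ∉ rest := (PySem.List.index?_eq_none_iff rest v).1 hidx
      have hidx' : List.idxOf? v rest = none := by
        rw [← PySem.List.index?_eq_idxOf?]
        exact hidx
      simp [solBBest, hfirst v, hidx, hidx', pvChars, hnm]
    | some i =>
      have hget : PySem.Dict.get? first v = some (n + (i : Int)) := by
        rw [hfirst v, hidx]; rfl
      simp only [solBBest, hget]
      rw [ih]
      simp only [pvChars, List.all_cons, hidx, Option.isSome_some, Bool.true_and,
        List.foldl_cons, Option.getD_some]

theorem all_congr_mem (p q : Int → Bool) (M : List Int) (h : ∀ w ∈ M, p w = q w) :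
    M.all p = M.all q := by
  induction M with
  | nil => rfl
  | cons u t ih =>
    simp only [List.all_cons]
    rw [h u (by simp), ih (fun w hw => h w (by simp [hw]))]

theorem solALoop_eq_chars (A : List Int) (rest M : List Int) (n : Nat)
    (hrest : rest = A.drop n)
    (hnodup : M.Nodup) (hne : M ≠ [])
    (hfresh : ∀ v ∈ M, v ∉ A.take n) :
    solALoop A rest M = pvChars rest (n : Int) (-1) M := by
  induction rest generalizing M n with
  | nil =>
    obtain ⟨v, t, rfl⟩ : ∃ v t, M = v :: t := by
      cases M with
      | nil => exact absurd rfl hne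
      | cons a b => exact ⟨a, b, rfl⟩
    simp [solALoop, pvChars, PySem.List.index?_eq_idxOf?]
  | cons v tail ih =>
    have hnlt : n < A.length := by
      by_contra hge
      rw [List.drop_eq_nil_of_le (by omega)] at hrest
      exact (List.cons_ne_nil v tail) hrest
    have hAn : A[n] = v := by
      rw [List.drop_eq_getElem_cons hnlt] at hrest
      exact (List.cons.injEq .. ▸ hrest.symm).1
    have htail : tail = A.drop (n + 1) := by
      rw [List.drop_eq_getElem_cons hnlt] at hrest
      exact (List.cons.injEq .. ▸ hrest.symm).2.symm
    by_cases hv : v ∈ M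
    · -- head is a missing leaf: A erases it; in the characterisation its index is 0
      have hrem : PySem.List.remove? M v = some (M.erase v) := PySem.List.remove?_eq_some_erase M v hv
      have hidxv : PySem.List.index? (v :: tail) v = some 0 := PySem.List.index?_cons_self ..
      have hshift : ∀ w ∈ M.erase v,
          PySem.List.index? (v :: tail) w = (PySem.List.index? tail w).map (· + 1) := by
        intro w hw
        exact PySem.List.index?_cons_of_ne tail (show v ≠ w from fun h => ((List.Nodup.mem_erase_iff hnodup).1 hw).1 h.symm)
      by_cases hz : M.erase v = []
      · -- M = [v]: A returns A.index(v) = n (first occurrence), chars gives n + 0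
        have hMv : M = [v] := by
          have hlen : M.length = 1 := by
            have := List.length_erase_of_mem hv
            rw [hz] at this
            have hpos : 1 ≤ M.length := List.length_pos_of_mem hv
            simp at this; omega
          obtain ⟨a, rfl⟩ := List.length_eq_one_iff.1 hlen
          have hva : v = a := by simpa using hv
          simp [hva]
        have hidx : PySem.List.index? A v = some n := by
          rw [PySem.List.index?_eq_some_iff]
          refine ⟨A.take n, A.drop (n+1), ?_, List.length_take_of_le (by omega), hfresh v hv⟩
          rw [← hAn, ← List.drop_eq_getElem_cons hnlt, List.take_append_drop]
        simp only [solALoop, hrem, if_pos hv, Option.getD_some, hz, if_true, ite_true, hidx]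
        subst hMv
        simp only [pvChars, List.all_cons, hidxv, List.all_nil, Option.isSome_some, Bool.and_true,
          if_true, ite_true, List.foldl_cons, List.foldl_nil, Option.getD_some, Nat.cast_zero, add_zero]
        rw [max_eq_right (by omega)]
      · -- more leaves still missing: recurse on the tail with M.erase v
        have ihe := ih (M.erase v) (n + 1) htail (hnodup.erase v) hz
          (fun w hw => by
            rw [List.take_succ_eq_append_getElem hnlt]
            intro hmem
            rcases List.mem_append.1 hmem with h | h
            · exact hfresh w ((List.Nodup.mem_erase_iff hnodup).1 hw).2 h
            · simp [hAn] at h; exact ((List.Nodup.mem_erase_iff hnodup).1 hw).1 h)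
        simp only [solALoop, hrem, if_pos hv, Option.getD_some]
        rw [if_neg hz, ihe]
        -- identify the two pvChars values
        have hallM : (M.all fun w => (PySem.List.index? (v :: tail) w).isSome)
            = ((M.erase v).all fun w => (PySem.List.index? tail w).isSome) := by
          have hMperm : M.Perm (v :: M.erase v) := List.perm_cons_erase hv
          rw [hMperm.all_eq]
          simp only [List.all_cons, hidxv, Option.isSome_some, Bool.true_and]
          apply all_congr_mem
          intro w hw
          rw [hshift w hw]
          cases PySem.List.index? tail w <;> simp
        simp only [pvChars, hallM]
        by_cases hall : ((M.erase v).all fun w => (PySem.List.index? tail w).isSome) = true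
        · rw [if_pos hall, if_pos hall]
          obtain ⟨w0, T0, hwT⟩ : ∃ w0 T0, M.erase v = w0 :: T0 := by
            cases h : M.erase v with
            | nil => exact absurd h hz
            | cons a b => exact ⟨a, b, rfl⟩
          have hfold := foldl_max_erase
            (fun w => (n : Int) + (((PySem.List.index? (v :: tail) w).getD 0 : Nat) : Int)) (-1) M v hv
          rw [hfold]
          simp only [hidxv, Option.getD_some, Nat.cast_zero, add_zero]
          rw [max_eq_right (by omega)]
          have hcongr := foldl_max_congr
            (fun w => (n : Int) + (((PySem.List.index? (v :: tail) w).getD 0 : Nat) : Int))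
            (fun w => ((n + 1 : Nat) : Int) + (((PySem.List.index? tail w).getD 0 : Nat) : Int))
            (n : Int) (M.erase v)
            (fun w hw => by
              have hs := hshift w hw
              have : (PySem.List.index? tail w).isSome := by
                have := List.all_eq_true.1 hall w hw
                simpa using this
              obtain ⟨i, hi⟩ := Option.isSome_iff_exists.mp this
              simp only [hs, hi, Option.map_some, Option.getD_some]
              push_cast
              ring)
          rw [hcongr, hwT]
          apply foldl_max_init
          · have h0 : (0 : Int) ≤ (((PySem.List.index? tail w0).getD 0 : Nat) : Int) := by positivity
            push_cast
            omega
          · have h0 : (0 : Int) ≤ (((PySem.List.index? tail w0).getD 0 : Nat) : Int) := by positivity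
            push_cast
            omega
        · rw [if_neg hall, if_neg hall]
    · -- head not missing: both sides shift by one position
      have hshift : ∀ w ∈ M,
          PySem.List.index? (v :: tail) w = (PySem.List.index? tail w).map (· + 1) := by
        intro w hw
        exact PySem.List.index?_cons_of_ne tail (show v ≠ w from fun h => hv (h ▸ hw))
      have ihe := ih M (n + 1) htail hnodup hne
        (fun w hw => by
          rw [List.take_succ_eq_append_getElem hnlt]
          intro hmem
          rcases List.mem_append.1 hmem with h | h
          · exact hfresh w hw h
          · simp [hAn] at h; exact hv (h ▸ hw))
      simp only [solALoop, if_neg hv, if_neg hne]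
      rw [ihe]
      have hallM : (M.all fun w => (PySem.List.index? (v :: tail) w).isSome)
          = (M.all fun w => (PySem.List.index? tail w).isSome) := by
        apply all_congr_mem
        intro w hw
        rw [hshift w hw]
        cases PySem.List.index? tail w <;> simp
      simp only [pvChars, hallM]
      by_cases hall : (M.all fun w => (PySem.List.index? tail w).isSome) = true
      · rw [if_pos hall, if_pos hall]
        apply foldl_max_congr
        intro w hw
        have hs := hshift w hw
        have : (PySem.List.index? tail w).isSome := by
          have := List.all_eq_true.1 hall w hw
          simpa using this
        obtain ⟨i, hi⟩ := Option.isSome_iff_exists.mp this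
        simp only [hs, hi, Option.map_some, Option.getD_some]
        push_cast
        ring
      · rw [if_neg hall, if_neg hall]

theorem le_getLast_of_pairwise {l : List Int} (h : l.Pairwise (· ≤ ·)) (hne : l ≠ []) :
    ∀ x ∈ l, x ≤ l.getLast hne := by
  induction l with
  | nil => simp
  | cons a t ih =>
    intro x hx
    rcases List.mem_cons.1 hx with rfl | hxt
    · cases t with
      | nil => simp
      | cons b u =>
        have hab : x ≤ b := (List.pairwise_cons.1 h).1 b (by simp)
        have := ih (List.pairwise_cons.1 h).2 (by simp) b (by simp)
        simpa [List.getLast_cons] using le_trans hab this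
    · cases t with
      | nil => simp at hxt
      | cons b u =>
        have := ih (List.pairwise_cons.1 h).2 (by simp) x hxt
        simpa [List.getLast_cons] using this

theorem solution_main (X : Int) (A : List Int) : solution X A = solution_alt X A := by
  unfold solution solution_alt
  by_cases hX : X ∈ A
  · rw [if_pos hX, if_pos hX]
    obtain ⟨k, hk⟩ : ∃ k, PySem.List.index? A X = some k :=
      Option.isSome_iff_exists.mp ((PySem.List.index?_isSome_iff A X).2 hX)
    have hc : ((k : Int) + 1) = (((k + 1 : Nat)) : Int) := by push_cast; ring
    simp only [hk, Option.getD_some, hc, PySem.List.slice_to_natCast, PySem.List.slice_from_natCast]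
    set P := A.take (k + 1) with hP
    have hPne : P ≠ [] := by
      intro h
      have hklt : k < A.length := (PySem.List.getElem_of_index?_eq_some hk).1
      have hlP : (List.take (k + 1) A).length = 0 := by rw [← hP, h]; rfl
      rw [List.length_take] at hlP
      omega
    set sb := PySem.List.sorted P (fun x => x) false with hsbdef
    have hsbne : sb ≠ [] := fun h => hPne ((PySem.List.sorted_eq_nil_iff P (fun x => x) false).1 h)
    obtain ⟨m, t, hsb⟩ : ∃ m t, sb = m :: t := by
      cases h : sb with
      | nil => exact absurd h hsbne
      | cons a b => exact ⟨a, b, rfl⟩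
    have hlo : PySem.List.pyGetD sb 0 0 = m := by rw [hsb]; exact PySem.List.pyGetD_zero_cons ..
    have hhi : PySem.List.pyGetD sb (-1) 0 = sb.getLast hsbne := PySem.List.pyGetD_neg_one sb 0 hsbne
    set hiA := sb.getLast hsbne with hhiA
    have hmem_sb : ∀ y, y ∈ sb ↔ y ∈ P := fun y => PySem.List.mem_sorted P (fun x => x) false y
    have hlo_min : ∀ y ∈ P, m ≤ y := fun y hy => PySem.List.key_head_sorted_le P (fun x => x) hsb y hy
    have hlo_mem : m ∈ P := (hmem_sb m).1 (hsb ▸ List.mem_cons_self ..)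
    have hpw : sb.Pairwise (· ≤ ·) := by
      have := PySem.List.sorted_pairwise (xs := P) (key := fun x => x)
      simpa [← hsbdef] using this
    have hhi_max : ∀ y ∈ P, y ≤ hiA := fun y hy =>
      le_getLast_of_pairwise hpw hsbne y ((hmem_sb y).2 hy)
    have hhi_mem : hiA ∈ P := (hmem_sb hiA).1 (List.getLast_mem hsbne)
    set S := PySem.Set.ofList P with hS
    have hSmem : ∀ y, y ∈ S ↔ y ∈ P := fun y => PySem.Set.mem_ofList ..
    obtain ⟨mB, hmB⟩ : ∃ y, PySem.List.min? S (fun x => x) = some y := by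
      cases h : PySem.List.min? S (fun x => x) with
      | none => exact absurd ((hSmem m).2 hlo_mem) (by rw [(PySem.List.min?_eq_none_iff S (fun x => x)).1 h]; simp)
      | some y => exact ⟨y, rfl⟩
    obtain ⟨MB, hMB⟩ : ∃ y, PySem.List.max? S (fun x => x) = some y := by
      cases h : PySem.List.max? S (fun x => x) with
      | none => exact absurd ((hSmem m).2 hlo_mem) (by rw [(PySem.List.max?_eq_none_iff S (fun x => x)).1 h]; simp)
      | some y => exact ⟨y, rfl⟩
    have hmBeq : mB = m :=
      le_antisymm (PySem.List.min?_isMin hmB m ((hSmem m).2 hlo_mem))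
        (hlo_min mB ((hSmem mB).1 (PySem.List.min?_mem hmB)))
    have hMBeq : MB = hiA :=
      le_antisymm (hhi_max MB ((hSmem MB).1 (PySem.List.max?_mem hMB)))
        (PySem.List.max?_isMax hMB hiA ((hSmem hiA).2 hhi_mem))
    set M0 := (PySem.List.pyRange m (hiA + 1) 1).filter (fun i => decide (i ∉ sb)) with hM0def
    have hfilter_eq : (PySem.List.pyRange m (hiA + 1) 1).filter (fun v => !(PySem.Set.contains S v)) = M0 := by
      rw [hM0def]
      apply List.filter_congr
      intro x _
      have hx : (PySem.Set.contains S x = true) ↔ x ∈ sb := by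
        rw [PySem.Set.contains_iff]
        exact (hSmem x).trans (hmem_sb x).symm
      by_cases hxs : x ∈ sb
      · simp [hx.2 hxs, hxs]
        exact (hSmem x).2 ((hmem_sb x).1 hxs)
      · have hcf : PySem.Set.contains S x = false := by
          rw [Bool.eq_false_iff]
          intro h
          exact hxs (hx.1 h)
        simp [hcf, hxs]
        exact fun h => hxs ((hmem_sb x).2 ((hSmem x).1 h))
    have hM0nodup : M0.Nodup := (PySem.List.nodup_pyRange_one m (hiA + 1)).filter _
    have hM0fresh : ∀ v ∈ M0, v ∉ A.take (k + 1) := by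
      intro v hv
      rw [hM0def, List.mem_filter] at hv
      have := hv.2
      simp only [decide_eq_true_eq] at this
      rw [hmem_sb v] at this
      exact this
    simp only [hlo, hhi, hmB, hMB, Option.getD_some, hmBeq, hMBeq, hfilter_eq]
    by_cases hM0 : M0 = []
    · rw [if_pos hM0, if_pos hM0]
    · rw [if_neg hM0, if_neg hM0]
      rw [solALoop_eq_chars A (A.drop (k + 1)) M0 (k + 1) rfl hM0nodup hM0 hM0fresh]
      rw [solBBest_eq_chars _ (A.drop (k + 1)) (((k + 1 : Nat)) : Int)
        (fun v => by
          rw [solBDict_get? (A.drop (k + 1)) _ PySem.Dict.empty v]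
          rw [PySem.Dict.get?_empty]
          simp only [Option.isSome_none, Bool.false_eq_true, if_false])]

  · rw [if_neg hX, if_neg hX]

-- ===== VERDICT (by name: the statement is the Claim_ definition above) =====
theorem solution_spec : Claim_equal_solution := by
  intro X A _
  exact solution_main X A
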